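-- pv_equiv track=rewrite | github.com/nangdev/codingtest_ready | greedy/programmers_greedy1.py | solution
-- ===== SOURCE A (Python) =====
-- def solution(n, lost, re):
--     los = sorted(lost)
--     reser = sorted(re)
--     count = 0
--
--     for i in los:
--         for j in reser:
--             if i-j == 1 or i-j == -1:
--                 reser.remove(j)
--                 count += 1
--                 break
--         if len(reser) == 0:
--             break
--
--     return n-(len(los)-count)
-- ===== SOURCE B (Python) =====
-- def solution(n, lost, re):
--     cnt = {}
--     for r in re:
--         cnt[r] = cnt.get(r, 0) + 1
--     missing = 0
--     for x in sorted(lost):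
--         if cnt.get(x - 1, 0) > 0:
--             cnt[x - 1] -= 1
--         elif cnt.get(x + 1, 0) > 0:
--             cnt[x + 1] -= 1
--         else:
--             missing += 1
--     return n - missing
-- ===== Notes on version B (the rewrite author's own statement) =====
-- stated objective: faster
-- what changed: Replaces A's quadratic scan-and-remove over a sorted reserve list by a one-pass counting dict of reserve sizes (no sorting of re, no inner scan): each lost student takes size x-1 if available else x+1, which is exactly the element A's ascending scan finds first.
import Mathlib
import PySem

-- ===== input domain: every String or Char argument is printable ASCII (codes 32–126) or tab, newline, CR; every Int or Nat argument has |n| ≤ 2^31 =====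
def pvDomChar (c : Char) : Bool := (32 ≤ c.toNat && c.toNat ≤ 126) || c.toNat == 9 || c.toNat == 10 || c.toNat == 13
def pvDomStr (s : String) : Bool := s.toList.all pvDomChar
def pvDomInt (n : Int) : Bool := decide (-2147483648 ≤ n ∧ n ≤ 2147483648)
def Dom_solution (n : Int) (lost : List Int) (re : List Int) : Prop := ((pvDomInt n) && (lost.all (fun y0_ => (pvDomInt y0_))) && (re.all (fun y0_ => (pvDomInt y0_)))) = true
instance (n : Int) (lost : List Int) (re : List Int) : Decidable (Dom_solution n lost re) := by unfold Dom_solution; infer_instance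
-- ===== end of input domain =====

-- B replaces A's O(L*R) scan-and-remove over the sorted reserve list by a counting
-- dict of reserve sizes, one pass and no inner scan (objective: faster, asymptotic).

-- ===== PORT A =====
-- inner 'for j in reser: if |i-j|==1: … break' — returns the first matching j
def pvInnerA (i : Int) : List Int → Option Int
  | [] => none
  | j :: rest => if i - j = 1 ∨ i - j = -1 then some j else pvInnerA i rest

-- outer 'for i in los' loop; state = (reser, count); the 'if len(reser)==0: break'
-- is the early return in each branch
def pvOuterA : List Int → List Int → Int → Int
  | [], _, count => count
  | i :: rest, reser, count =>
    match pvInnerA i reser with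
    | some j =>
      let reser' := (PySem.List.remove? reser j).getD reser
      if reser'.length = 0 then count + 1 else pvOuterA rest reser' (count + 1)
    | none => if reser.length = 0 then count else pvOuterA rest reser count

def solution (n : Int) (lost : List Int) (re : List Int) : Int :=
  let los := PySem.List.sorted lost (fun x => x) false
  let reser := PySem.List.sorted re (fun x => x) false
  let count := pvOuterA los reser 0
  n - ((los.length : Int) - count)

-- ===== PORT B =====
-- 'for x in sorted(lost)' loop of Source B; state = (cnt, missing)
def pvLoopB : List Int → PySem.Dict Int Int → Int → Int
  | [], _, missing => missing
  | x :: rest, cnt, missing =>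
    if cnt.getD (x - 1) 0 > 0 then
      pvLoopB rest (cnt.insert (x - 1) (cnt.getD (x - 1) 0 - 1)) missing
    else if cnt.getD (x + 1) 0 > 0 then
      pvLoopB rest (cnt.insert (x + 1) (cnt.getD (x + 1) 0 - 1)) missing
    else pvLoopB rest cnt (missing + 1)

def solution_alt (n : Int) (lost : List Int) (re : List Int) : Int :=
  let cnt := re.foldl (fun d r => d.insert r (d.getD r 0 + 1)) PySem.Dict.empty
  let missing := pvLoopB (PySem.List.sorted lost (fun x => x) false) cnt 0
  n - missing

-- ===== PRECONDITION & SPEC =====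
def Spec_solution (n : Int) (lost : List Int) (re : List Int) (out : Int) : Prop := out = solution_alt n lost re
instance (n : Int) (lost : List Int) (re : List Int) (out : Int) : Decidable (Spec_solution n lost re out) := by unfold Spec_solution; infer_instance

-- ===== CLAIM (what is proved, stated in full; the proofs are below) =====
def Claim_equal_solution : Prop := ∀ (n : Int) (lost : List Int) (re : List Int), Dom_solution n lost re → Spec_solution n lost re (solution n lost re)

-- ===== LEMMAS AND PROOFS =====

-- On a sorted reserve, A's inner scan finds i-1 if present, else i+1 if present.
lemma pvInnerA_eq (i : Int) (reser : List Int) (hs : reser.Pairwise (· ≤ ·)) :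
    pvInnerA i reser =
      if (i - 1) ∈ reser then some (i - 1)
      else if (i + 1) ∈ reser then some (i + 1) else none := by
  induction reser with
  | nil => simp [pvInnerA]
  | cons j rest ih =>
    rw [List.pairwise_cons] at hs
    obtain ⟨hj, hs'⟩ := hs
    by_cases h1 : j = i - 1
    · subst h1
      have hc : i - (i - 1) = 1 ∨ i - (i - 1) = -1 := by left; ring
      simp [pvInnerA, List.mem_cons]
    · by_cases h2 : j = i + 1
      · subst h2
        have hc : i - (i + 1) = 1 ∨ i - (i + 1) = -1 := by right; ring
        have hnm : (i - 1) ∉ rest := fun hm => by have := hj _ hm; omega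
        have hne : ¬ (i - 1 = i + 1) := by omega
        simp [pvInnerA, List.mem_cons, hnm, hne]
      · have hc : ¬ (i - j = 1 ∨ i - j = -1) := by omega
        have h1' : ¬ (i - 1 = j) := fun h => h1 h.symm
        have h2' : ¬ (i + 1 = j) := fun h => h2 h.symm
        simp only [pvInnerA, if_neg hc, List.mem_cons, h1', h2', false_or]
        exact ih hs' 

lemma pvOuterA_nil (los : List Int) (c : Int) : pvOuterA los [] c = c := by
  cases los <;> simp [pvOuterA, pvInnerA]

-- Main invariant: matches counted by A plus misses counted by B total the lost list.
lemma pv_main (los : List Int) : ∀ (reser : List Int) (cnt : PySem.Dict Int Int) (c m : Int),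
    reser.Pairwise (· ≤ ·) →
    (∀ v, cnt.getD v 0 = (reser.count v : Int)) →
    pvOuterA los reser c + pvLoopB los cnt m = c + m + los.length := by
  induction los with
  | nil => intro reser cnt c m _ _; simp [pvOuterA, pvLoopB]
  | cons x rest ih =>
    intro reser cnt c m hs hinv
    simp only [pvOuterA, pvLoopB, pvInnerA_eq x reser hs]
    by_cases hm1 : (x - 1) ∈ reser
    · have hcp : 0 < reser.count (x - 1) := List.count_pos_iff.mpr hm1
      have hcnt1 : cnt.getD (x - 1) 0 > 0 := by rw [hinv]; exact_mod_cast hcp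
      have hrem : PySem.List.remove? reser (x - 1) = some (reser.erase (x - 1)) :=
        PySem.List.remove?_eq_some_erase reser _ hm1
      have hs' : (reser.erase (x - 1)).Pairwise (· ≤ ·) := hs.sublist (List.erase_sublist ..)
      have hinv' : ∀ v, (cnt.insert (x - 1) (cnt.getD (x - 1) 0 - 1)).getD v 0
          = ((reser.erase (x - 1)).count v : Int) := by
        intro v
        rw [PySem.Dict.getD_insert]
        by_cases hv : v = x - 1
        · subst hv
          have hce := List.count_erase_self (a := x - 1) (l := reser)
          rw [if_pos rfl, hinv]
          omega
        · rw [if_neg hv, hinv, List.count_erase_of_ne hv]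
      have hIH := ih (reser.erase (x - 1)) _ (c + 1) m hs' hinv'
      simp only [if_pos hm1, if_pos hcnt1, hrem, Option.getD_some]
      by_cases hz : (reser.erase (x - 1)).length = 0
      · rw [List.length_eq_zero_iff.mp hz, pvOuterA_nil _ (c + 1)] at hIH
        rw [if_pos hz]
        simp only [List.length_cons]; push_cast; omega
      · rw [if_neg hz]
        simp only [List.length_cons]; push_cast; push_cast at hIH; omega
    · have hz1 : cnt.getD (x - 1) 0 = 0 := by
        rw [hinv]; exact_mod_cast List.count_eq_zero.mpr hm1
      by_cases hm2 : (x + 1) ∈ reser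
      · have hcp : 0 < reser.count (x + 1) := List.count_pos_iff.mpr hm2
        have hcnt2 : cnt.getD (x + 1) 0 > 0 := by rw [hinv]; exact_mod_cast hcp
        have hrem : PySem.List.remove? reser (x + 1) = some (reser.erase (x + 1)) :=
          PySem.List.remove?_eq_some_erase reser _ hm2
        have hs' : (reser.erase (x + 1)).Pairwise (· ≤ ·) := hs.sublist (List.erase_sublist ..)
        have hinv' : ∀ v, (cnt.insert (x + 1) (cnt.getD (x + 1) 0 - 1)).getD v 0
            = ((reser.erase (x + 1)).count v : Int) := by
          intro v
          rw [PySem.Dict.getD_insert]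
          by_cases hv : v = x + 1
          · subst hv
            have hce := List.count_erase_self (a := x + 1) (l := reser)
            rw [if_pos rfl, hinv]
            omega
          · rw [if_neg hv, hinv, List.count_erase_of_ne hv]
        have hIH := ih (reser.erase (x + 1)) _ (c + 1) m hs' hinv'
        simp only [if_neg hm1, if_pos hm2, if_neg (by omega : ¬ cnt.getD (x - 1) 0 > 0),
          if_pos hcnt2, hrem, Option.getD_some]
        by_cases hz : (reser.erase (x + 1)).length = 0
        · rw [List.length_eq_zero_iff.mp hz, pvOuterA_nil _ (c + 1)] at hIH
          rw [if_pos hz]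
          simp only [List.length_cons]; push_cast; omega
        · rw [if_neg hz]
          simp only [List.length_cons]; push_cast; push_cast at hIH; omega
      · have hz2 : cnt.getD (x + 1) 0 = 0 := by
          rw [hinv]; exact_mod_cast List.count_eq_zero.mpr hm2
        have hIH := ih reser cnt c (m + 1) hs hinv
        simp only [if_neg hm1, if_neg hm2, if_neg (by omega : ¬ cnt.getD (x - 1) 0 > 0),
          if_neg (by omega : ¬ cnt.getD (x + 1) 0 > 0)]
        by_cases hz : reser.length = 0
        · rw [if_pos hz]
          rw [List.length_eq_zero_iff.mp hz] at hIH
          rw [pvOuterA_nil] at hIH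
          simp only [List.length_cons]; push_cast; omega
        · rw [if_neg hz]
          simp only [List.length_cons]; push_cast; push_cast at hIH; omega

-- ===== VERDICT (by name: the statement is the Claim_ definition above) =====
theorem solution_spec : Claim_equal_solution := by
  intro n lost re _
  unfold Spec_solution solution solution_alt
  dsimp only
  have hs : (PySem.List.sorted re (fun x => x) false).Pairwise (· ≤ ·) :=
    PySem.List.sorted_pairwise re (fun x => x)
  have hinv : ∀ v, (re.foldl (fun d r => d.insert r (d.getD r 0 + 1)) PySem.Dict.empty).getD v 0
      = ((PySem.List.sorted re (fun x => x) false).count v : Int) := by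
    intro v
    rw [PySem.Dict.getD_foldl_insert_add_one, (PySem.List.sorted_perm ..).count_eq v]
    simp
  have h := pv_main (PySem.List.sorted lost (fun x => x) false)
    (PySem.List.sorted re (fun x => x) false) _ 0 0 hs hinv
  omega
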